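/- GENERATED by farm/mkstatement.py from design/units.tsv (unit `DGifSlurp.7`) and the assertions of Gif/Spec/Seg_DGifSlurp.lean — do not edit.
   THE STATEMENT of the proof unit `DGifSlurp.7`: segment 7 of `DGifSlurp` (6 instructions; entries 0x10a948;
   exits 0x10a96a,0x10a7d4; ranges 0x10a948-0x10a96a)
   takes each of its entry assertions to one of its exit assertions (`Gif.Spec.DGifSlurp.Seg7`), given the contracts of its callees.
   What the names mean: ProgX/Base/Spec/Basic.lean (the shared hypotheses), Gif/Spec/Seg_DGifSlurp.lean (the assertions). The theorem to prove:
   `theorem DGifSlurp_7_ok : Gif.Spec.DGifSlurp_7.Statement`. -/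
import Gif.Code
import Gif.Dec.All
import Gif.Labels
import Gif.Spec.Seg_DGifSlurp
namespace Gif.Spec.DGifSlurp_7
open X86 X86.User Asan

/-- The statement of unit `DGifSlurp.7`. -/
def Statement : Prop :=
  ∀ (Lay : Layout) (_hLay : Lay.hi = 0x1000000) (μ : Microarch) (_hμ : UserX.MicroOK μ) (u₀ : State)
    (_hcode : HasCodeNat Lay u₀ Gif.L.DGifSlurp.entry Gif.Code.code_DGifSlurp.nat Gif.L.DGifSlurp.size)
    (_h_asan_load4_noabort : Asan.SmallCheck Lay μ ProgX.Base.WayInv (ProgX.Base.CodeOK u₀) [.rax, .rcx, .rdx] 4 ProgX.Base.L.__asan_load4_noabort.entry),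
    Gif.Spec.DGifSlurp.Seg7 Lay μ u₀

end Gif.Spec.DGifSlurp_7
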